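-- pv_equiv track=rewrite | github.com/Madjid-CH/aoc2024 | src/day10/day10.py | count_hiking_trails
-- ===== SOURCE A (Python) =====
-- def count_hiking_trails(tmap, trailhead):
--     up = (0, -1)
--     down = (0, 1)
--     left = (-1, 0)
--     right = (1, 0)
--     trails = {(0, trailhead)}
--     while not all(height == 9 for height, _ in trails):
--         for trail in list(trails):
--             height, (x, y) = trail
--             for dx, dy in (up, down, left, right):
--                 new_x, new_y = x + dx, y + dy
--                 if 0 <= new_x < len(tmap) and 0 <= new_y < len(tmap[0]):
--                     if tmap[new_x][new_y] == height + 1: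
--                         trails.add((height + 1, (new_x, new_y)))
--             if height != 9:
--                 trails.remove(trail)
--     return len(trails)
-- ===== SOURCE B (Python) =====
-- def count_hiking_trails(tmap, trailhead):
--     def reach(height, pos):
--         if height == 9:
--             return {pos}
--         x, y = pos
--         summits = set()
--         for dx, dy in ((0, -1), (0, 1), (-1, 0), (1, 0)):
--             nx, ny = x + dx, y + dy
--             if 0 <= nx < len(tmap) and 0 <= ny < len(tmap[0]) and tmap[nx][ny] == height + 1:
--                 summits |= reach(height + 1, (nx, ny))
--         return summits
--     return len(reach(0, trailhead))
-- ===== Notes on version B (the rewrite author's own statement) =====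
-- stated objective: simpler
-- what changed: Replaced the level-synchronous BFS that mutates a set of (height, position) pairs in a while loop with a direct recursive DFS reach(height, pos) that returns the set of reachable height-9 cells.
-- outside the precondition, e.g. on count_hiking_trails([[3, 3], [7]], (0, 0)): A returns 0, B returns 0
import Mathlib
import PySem

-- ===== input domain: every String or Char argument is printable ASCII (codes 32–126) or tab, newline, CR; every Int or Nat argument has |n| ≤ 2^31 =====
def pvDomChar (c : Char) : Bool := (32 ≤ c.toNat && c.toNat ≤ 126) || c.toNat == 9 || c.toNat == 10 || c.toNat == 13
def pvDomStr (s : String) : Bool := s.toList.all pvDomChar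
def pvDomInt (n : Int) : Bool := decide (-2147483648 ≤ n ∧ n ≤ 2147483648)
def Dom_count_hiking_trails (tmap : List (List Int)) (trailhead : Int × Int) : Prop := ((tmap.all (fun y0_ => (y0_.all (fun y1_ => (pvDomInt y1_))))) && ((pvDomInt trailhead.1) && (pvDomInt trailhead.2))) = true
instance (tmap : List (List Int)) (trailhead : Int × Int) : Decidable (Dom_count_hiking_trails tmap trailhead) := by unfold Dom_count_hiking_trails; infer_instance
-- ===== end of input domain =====

-- B replaces A's while-loop BFS that mutates a set of (height, position) pairs by a recursive
-- DFS collecting the reachable height-9 cells into a set (simpler decomposition, same values).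


-- ===== PORT A =====
-- (up, down, left, right) in A's order
def pvA_dirs : List (Int × Int) := [(0, -1), (0, 1), (-1, 0), (1, 0)]

-- the inner `for dx, dy in …` body: bounds checks, then the value check, then trails.add.
-- len(tmap[0]) is rendered as (pyGetD tmap 0 []).length: Python evaluates it only after
-- 0 <= new_x < len(tmap) holds, so tmap is then nonempty and pyGetD is exactly tmap[0]; on an
-- empty tmap the conjunction is already false either way (the short-circuit is preserved).
def pvA_tryAdd (tmap : List (List Int)) (h x y : Int)
    (tr : PySem.Set (Int × (Int × Int))) (d : Int × Int) : PySem.Set (Int × (Int × Int)) :=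
  if decide (0 ≤ x + d.1) && decide (x + d.1 < (tmap.length : Int)) && decide (0 ≤ y + d.2)
      && decide (y + d.2 < ((PySem.List.pyGetD tmap 0 []).length : Int)) then
    if PySem.List.pyGetD (PySem.List.pyGetD tmap (x + d.1) []) (y + d.2) 0 == h + 1 then
      PySem.Set.add tr (h + 1, (x + d.1, y + d.2))
    else tr
  else tr

-- one `for trail in list(trails)` body; Python's trails.remove(trail) cannot raise here (the
-- element comes from the snapshot and only its own step removes it), so it is Set.discard.
def pvA_process (tmap : List (List Int)) (tr : PySem.Set (Int × (Int × Int)))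
    (trail : Int × (Int × Int)) : PySem.Set (Int × (Int × Int)) :=
  if trail.1 == 9 then pvA_dirs.foldl (pvA_tryAdd tmap trail.1 trail.2.1 trail.2.2) tr
  else PySem.Set.discard (pvA_dirs.foldl (pvA_tryAdd tmap trail.1 trail.2.1 trail.2.2) tr) trail

-- one pass of the while body: fold the snapshot list(trails) over the current set
def pvA_pass (tmap : List (List Int)) (tr : PySem.Set (Int × (Int × Int))) :
    PySem.Set (Int × (Int × Int)) :=
  tr.foldl (pvA_process tmap) tr

-- the while loop; fuel 10 is exact: after p passes every element has height p (proved below),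
-- so the loop body runs at most 9 times before the all-heights-are-9 test (or emptiness) stops it.
def pvA_loop (tmap : List (List Int)) :
    Nat → PySem.Set (Int × (Int × Int)) → PySem.Set (Int × (Int × Int))
  | 0, tr => tr
  | fuel + 1, tr =>
    if tr.all (fun t => t.1 == 9) then tr
    else pvA_loop tmap fuel (pvA_pass tmap tr)

def count_hiking_trails (tmap : List (List Int)) (trailhead : Int × Int) : Int :=
  PySem.Set.len (pvA_loop tmap 10 (PySem.Set.ofList [((0 : Int), trailhead)]))

-- ===== PORT B =====
-- the `for dx, dy in …: summits |= reach(height+1, (nx, ny))` loop of Source B, with the recursive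
-- call abstracted as `rec` (it is reach at height+1, one unit of fuel spent)
def pvB_visit (tmap : List (List Int)) (h : Int) (pos : Int × Int)
    (rec : Int × Int → PySem.Set (Int × Int)) : PySem.Set (Int × Int) :=
  [((0 : Int), (-1 : Int)), (0, 1), (-1, 0), (1, 0)].foldl (fun s d =>
    if decide (0 ≤ pos.1 + d.1) && decide (pos.1 + d.1 < (tmap.length : Int))
        && decide (0 ≤ pos.2 + d.2)
        && decide (pos.2 + d.2 < ((PySem.List.pyGetD tmap 0 []).length : Int))
        && (PySem.List.pyGetD (PySem.List.pyGetD tmap (pos.1 + d.1) []) (pos.2 + d.2) 0 == h + 1) then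
      PySem.Set.union s (rec (pos.1 + d.1, pos.2 + d.2))
    else s) PySem.Set.empty

-- reach(height, pos); the fuel only makes the recursion structural: every recursive call raises
-- the height by one and height reaches 9 before fuel 10 runs out, so the fuel-0 branch is dead.
def pvB_reach (tmap : List (List Int)) : Nat → Int → Int × Int → PySem.Set (Int × Int)
  | 0, h, pos => if h == 9 then PySem.Set.ofList [pos] else PySem.Set.empty
  | fuel + 1, h, pos =>
    if h == 9 then PySem.Set.ofList [pos]
    else pvB_visit tmap h pos (pvB_reach tmap fuel (h + 1))

def count_hiking_trails_alt (tmap : List (List Int)) (trailhead : Int × Int) : Int :=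
  PySem.Set.len (pvB_reach tmap 10 0 trailhead)

-- ===== PRECONDITION & SPEC =====
-- Pre_ excludes ragged grids on which A's BFS may index a row shorter than row 0 (Python
-- IndexError): it keeps grids whose rows are all at least as long as row 0, plus (for coverage
-- of the common far-away-trailhead case) any grid whose trailhead has no in-bounds neighbour,
-- where no cell is ever read.  It is slightly narrower than A's exact raise set: on a ragged
-- grid where the trail dies before reaching a short row A still returns (see the cited example).
def Pre_count_hiking_trails (tmap : List (List Int)) (trailhead : Int × Int) : Prop :=
  (∀ row ∈ tmap, (tmap.headD []).length ≤ row.length) ∨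
  (∀ d ∈ [((0 : Int), (-1 : Int)), (0, 1), (-1, 0), (1, 0)],
    ¬ (0 ≤ trailhead.1 + d.1 ∧ trailhead.1 + d.1 < (tmap.length : Int) ∧
       0 ≤ trailhead.2 + d.2 ∧ trailhead.2 + d.2 < ((tmap.headD []).length : Int)))
instance (tmap : List (List Int)) (trailhead : Int × Int) : Decidable (Pre_count_hiking_trails tmap trailhead) := by unfold Pre_count_hiking_trails; infer_instance

def pvWitness_count_hiking_trails : List (List Int) × (Int × Int) := ([[0, 1], [1, 2]], (0, 0))

def Spec_count_hiking_trails (tmap : List (List Int)) (trailhead : Int × Int) (out : Int) : Prop := out = count_hiking_trails_alt tmap trailhead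
instance (tmap : List (List Int)) (trailhead : Int × Int) (out : Int) : Decidable (Spec_count_hiking_trails tmap trailhead out) := by unfold Spec_count_hiking_trails; infer_instance

-- ===== CLAIM (what is proved, stated in full; the proofs are below) =====
def Claim_equal_count_hiking_trails : Prop := ∀ (tmap : List (List Int)) (trailhead : Int × Int), Dom_count_hiking_trails tmap trailhead → Pre_count_hiking_trails tmap trailhead → Spec_count_hiking_trails tmap trailhead (count_hiking_trails tmap trailhead)

-- ===== LEMMAS AND PROOFS =====

-- the guard both ports test for a candidate cell q at expected grid value v
def pvOkB (tmap : List (List Int)) (v : Int) (q : Int × Int) : Bool :=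
  decide (0 ≤ q.1) && decide (q.1 < (tmap.length : Int)) && decide (0 ≤ q.2)
    && decide (q.2 < ((PySem.List.pyGetD tmap 0 []).length : Int))
    && (PySem.List.pyGetD (PySem.List.pyGetD tmap q.1 []) q.2 0 == v)

-- one legal step from p at height h
def pvStepMem (tmap : List (List Int)) (h : Int) (p q : Int × Int) : Prop :=
  ∃ d ∈ pvA_dirs, q = (p.1 + d.1, p.2 + d.2) ∧ pvOkB tmap (h + 1) q = true

-- n legal steps starting at height h
def pvChain (tmap : List (List Int)) : Nat → Int → Int × Int → Int × Int → Prop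
  | 0, _, p, q => q = p
  | n + 1, h, p, q => ∃ r, pvStepMem tmap h p r ∧ pvChain tmap n (h + 1) r q

theorem pvChain_split (tmap : List (List Int)) (a : Nat) :
    ∀ (b : Nat) (h : Int) (p q : Int × Int),
    pvChain tmap (a + b) h p q ↔
      ∃ r, pvChain tmap a h p r ∧ pvChain tmap b (h + (a : Int)) r q := by
  induction a with
  | zero => intro b h p q; simp [pvChain]
  | succ a ih =>
    intro b h p q
    rw [show a + 1 + b = (a + b) + 1 from by omega,
        show ((a + 1 : Nat) : ℤ) = (a : ℤ) + 1 from by push_cast; ring]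
    simp only [pvChain]
    constructor
    · rintro ⟨r, hs, hc⟩
      obtain ⟨w, hw1, hw2⟩ := (ih b (h + 1) r q).mp hc
      refine ⟨w, ⟨r, hs, hw1⟩, ?_⟩
      rw [show h + ((a : ℤ) + 1) = h + 1 + (a : ℤ) from by ring]
      exact hw2
    · rintro ⟨w, ⟨r, hs, hw1⟩, hw2⟩
      refine ⟨r, hs, (ih b (h + 1) r q).mpr ⟨w, hw1, ?_⟩⟩
      rw [show h + 1 + (a : ℤ) = h + ((a : ℤ) + 1) from by ring]
      exact hw2

theorem pvChain_one (tmap : List (List Int)) (h : Int) (p q : Int × Int) :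
    pvChain tmap 1 h p q ↔ pvStepMem tmap h p q := by
  simp only [pvChain]
  constructor
  · rintro ⟨r, hs, hq⟩; rwa [hq]
  · intro hs; exact ⟨q, hs, rfl⟩

-- ---- A side ----

theorem ite_and_bool {α : Type} (a b : Bool) (e1 e2 : α) :
    (if a && b then e1 else e2) = if a then (if b then e1 else e2) else e2 := by
  cases a <;> cases b <;> simp

theorem pvA_tryAdd_eq (tmap : List (List Int)) (h x y : Int)
    (tr : PySem.Set (Int × (Int × Int))) (d : Int × Int) :
    pvA_tryAdd tmap h x y tr d =
      if pvOkB tmap (h + 1) (x + d.1, y + d.2) then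
        PySem.Set.add tr (h + 1, (x + d.1, y + d.2))
      else tr := by
  simp only [pvA_tryAdd, pvOkB, ite_and_bool]
  split_ifs <;> simp_all <;> omega

theorem memA_fold (tmap : List (List Int)) (h x y : Int) (l : List (Int × Int))
    (tr : PySem.Set (Int × (Int × Int))) (t : Int × (Int × Int)) :
    t ∈ l.foldl (pvA_tryAdd tmap h x y) tr ↔
      t ∈ tr ∨ ∃ d ∈ l, pvOkB tmap (h + 1) (x + d.1, y + d.2) = true ∧
        t = (h + 1, (x + d.1, y + d.2)) := by
  induction l generalizing tr with
  | nil => simp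
  | cons d l ih =>
    simp only [List.foldl_cons]
    rw [pvA_tryAdd_eq, ih]
    split_ifs with hok
    · rw [PySem.Set.mem_add]
      constructor
      · rintro ((h1 | h1) | ⟨d', hd', hok', ht⟩)
        · exact Or.inl h1
        · exact Or.inr ⟨d, List.mem_cons_self .., hok, h1⟩
        · exact Or.inr ⟨d', List.mem_cons_of_mem _ hd', hok', ht⟩
      · rintro (h1 | ⟨d', hd', hok', ht⟩)
        · exact Or.inl (Or.inl h1)
        · rcases List.mem_cons.mp hd' with h2 | h2
          · subst h2; exact Or.inl (Or.inr ht)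
          · exact Or.inr ⟨d', h2, hok', ht⟩
    · constructor
      · rintro (h1 | ⟨d', hd', hok', ht⟩)
        · exact Or.inl h1
        · exact Or.inr ⟨d', List.mem_cons_of_mem _ hd', hok', ht⟩
      · rintro (h1 | ⟨d', hd', hok', ht⟩)
        · exact Or.inl h1
        · rcases List.mem_cons.mp hd' with h2 | h2
          · subst h2; exact absurd hok' (by simp [hok])
          · exact Or.inr ⟨d', h2, hok', ht⟩

theorem nodupA_fold (tmap : List (List Int)) (h x y : Int) (l : List (Int × Int))
    (tr : PySem.Set (Int × (Int × Int))) (hnd : tr.Nodup) :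
    (l.foldl (pvA_tryAdd tmap h x y) tr).Nodup := by
  induction l generalizing tr with
  | nil => exact hnd
  | cons d l ih =>
    simp only [List.foldl_cons]
    rw [pvA_tryAdd_eq]
    split_ifs
    · exact ih _ (PySem.Set.nodup_add _ _ hnd)
    · exact ih _ hnd

theorem mem_process (tmap : List (List Int)) (tr : PySem.Set (Int × (Int × Int)))
    (s t : Int × (Int × Int)) (hs : s.1 ≠ 9) :
    t ∈ pvA_process tmap tr s ↔
      ((t ∈ tr ∨ (t.1 = s.1 + 1 ∧ pvStepMem tmap s.1 s.2 t.2)) ∧ t ≠ s) := by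
  simp only [pvA_process]
  rw [if_neg (by simpa using hs), PySem.Set.mem_discard, memA_fold]
  constructor
  · rintro ⟨h1 | ⟨d, hd, hok, ht⟩, hne⟩
    · exact ⟨Or.inl h1, hne⟩
    · subst ht
      exact ⟨Or.inr ⟨rfl, d, hd, rfl, hok⟩, hne⟩
  · rintro ⟨h1 | ⟨h1, d, hd, hq, hok⟩, hne⟩
    · exact ⟨Or.inl h1, hne⟩
    · refine ⟨Or.inr ⟨d, hd, by rw [← hq]; exact hok, ?_⟩, hne⟩
      exact Prod.ext_iff.mpr ⟨h1, hq⟩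

theorem nodup_process (tmap : List (List Int)) (tr : PySem.Set (Int × (Int × Int)))
    (s : Int × (Int × Int)) (hnd : tr.Nodup) : (pvA_process tmap tr s).Nodup := by
  simp only [pvA_process]
  split_ifs
  · exact nodupA_fold _ _ _ _ _ _ hnd
  · exact PySem.Set.nodup_discard _ _ (nodupA_fold _ _ _ _ _ _ hnd)

theorem mem_pass_aux (tmap : List (List Int)) (h : Int) (hne : h ≠ 9)
    (l : List (Int × (Int × Int))) (hl : ∀ s ∈ l, s.1 = h)
    (acc : PySem.Set (Int × (Int × Int))) (t : Int × (Int × Int)) :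
    t ∈ l.foldl (pvA_process tmap) acc ↔
      (t ∈ acc ∧ t ∉ l) ∨ (t.1 = h + 1 ∧ ∃ p, (h, p) ∈ l ∧ pvStepMem tmap h p t.2) := by
  induction l generalizing acc with
  | nil => simp
  | cons s l ih =>
    have hs1 : s.1 = h := hl s (List.mem_cons_self ..)
    have hsne : s.1 ≠ 9 := by rw [hs1]; exact hne
    simp only [List.foldl_cons]
    rw [ih (fun x hx => hl x (List.mem_cons_of_mem _ hx))]
    constructor
    · rintro (⟨hmem, hnotl⟩ | ⟨ht1, p, hp, hstep⟩)
      · rcases (mem_process tmap acc s t hsne).mp hmem with ⟨h1 | ⟨h1, h2⟩, hne'⟩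
        · exact Or.inl ⟨h1, by simp [hne', hnotl]⟩
        · refine Or.inr ⟨by rw [← hs1]; exact h1, s.2, ?_, by rw [← hs1]; exact h2⟩
          rw [show ((h, s.2) : Int × (Int × Int)) = s from Prod.ext_iff.mpr ⟨hs1.symm, rfl⟩]
          exact List.mem_cons_self ..
      · exact Or.inr ⟨ht1, p, List.mem_cons_of_mem _ hp, hstep⟩
    · rintro (⟨hmem, hnotl⟩ | ⟨ht1, p, hp, hstep⟩)
      · have hne' : t ≠ s := fun he => hnotl (he ▸ List.mem_cons_self ..)
        have hnl : t ∉ l := fun hil => hnotl (List.mem_cons_of_mem _ hil)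
        exact Or.inl ⟨(mem_process tmap acc s t hsne).mpr ⟨Or.inl hmem, hne'⟩, hnl⟩
      · rcases List.mem_cons.mp hp with h1 | h1
        · -- the step is from s itself: t is added, and t ∉ l since its height is h + 1
          have hps : s.2 = p := (congrArg Prod.snd h1.symm)
          have ht : t ∈ pvA_process tmap acc s := by
            refine (mem_process tmap acc s t hsne).mpr
              ⟨Or.inr ⟨by rw [hs1]; exact ht1, by rw [hps, hs1]; exact hstep⟩, fun he => ?_⟩
            rw [he, hs1] at ht1; omega
          refine Or.inl ⟨ht, fun hil => ?_⟩
          have := hl t (List.mem_cons_of_mem _ hil)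
          rw [this] at ht1; omega
        · exact Or.inr ⟨ht1, p, h1, hstep⟩

theorem nodup_pass_aux (tmap : List (List Int)) (l : List (Int × (Int × Int)))
    (acc : PySem.Set (Int × (Int × Int))) (hnd : acc.Nodup) :
    (l.foldl (pvA_process tmap) acc).Nodup := by
  induction l generalizing acc with
  | nil => exact hnd
  | cons s l ih => exact ih _ (nodup_process tmap acc s hnd)

theorem pvA_loop_char (tmap : List (List Int)) (th : Int × Int) :
    ∀ (fuel n : Nat) (tr : PySem.Set (Int × (Int × Int))), n ≤ 9 → 10 - n ≤ fuel →
    tr.Nodup → (∀ t, t ∈ tr ↔ t.1 = (n : Int) ∧ pvChain tmap n 0 th t.2) →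
    (pvA_loop tmap fuel tr).Nodup ∧
      ∀ t, t ∈ pvA_loop tmap fuel tr ↔ t.1 = 9 ∧ pvChain tmap 9 0 th t.2 := by
  intro fuel
  induction fuel with
  | zero => intro n tr hn hf _ _; omega
  | succ fuel ih =>
    intro n tr hn hf hnd hmem
    simp only [pvA_loop]
    by_cases hall : (tr.all fun t => t.1 == 9) = true
    · rw [if_pos hall]
      rcases Nat.lt_or_ge n 9 with h9 | h9
      · -- n < 9: the all-heights-are-9 test only passes because tr is empty
        rcases tr with _ | ⟨t0, tr'⟩
        · refine ⟨List.nodup_nil, fun t => ?_⟩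
          simp only [List.not_mem_nil, false_iff]
          rintro ⟨ht1, hc⟩
          rw [show (9 : Nat) = n + (9 - n) from by omega] at hc
          obtain ⟨r, hr, -⟩ := (pvChain_split tmap n (9 - n) 0 th t.2).mp hc
          have := (hmem ((n : Int), r)).mpr ⟨rfl, hr⟩
          simp at this
        · exfalso
          have h1 : t0.1 = (n : Int) := ((hmem t0).mp (List.mem_cons_self ..)).1
          have h2 := List.all_eq_true.mp hall t0 (List.mem_cons_self ..)
          have h3 : t0.1 = 9 := by simpa using h2
          omega
      · -- n = 9: tr already is the final set
        have h9' : n = 9 := by omega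
        subst h9'
        exact ⟨hnd, fun t => by simpa using hmem t⟩
    · rw [if_neg hall]
      have h9 : n < 9 := by
        by_contra hge
        have h9' : n = 9 := by omega
        apply hall
        rw [List.all_eq_true]
        intro t ht
        have := ((hmem t).mp ht).1
        simp [this, h9']
      have hu : ∀ s ∈ tr, s.1 = (n : Int) := fun s hs => ((hmem s).mp hs).1
      have hne9 : (n : Int) ≠ 9 := by omega
      refine ih (n + 1) (pvA_pass tmap tr) (by omega) (by omega)
        (nodup_pass_aux tmap tr tr hnd) (fun t => ?_)
      rw [show pvA_pass tmap tr = tr.foldl (pvA_process tmap) tr from rfl,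
          mem_pass_aux tmap (n : Int) hne9 tr hu tr t]
      constructor
      · rintro (⟨hin, hout⟩ | ⟨ht1, p, hp, hstep⟩)
        · exact absurd hin hout
        · have hcn : pvChain tmap n 0 th p := ((hmem ((n : Int), p)).mp hp).2
          refine ⟨by push_cast; exact ht1,
            (pvChain_split tmap n 1 0 th t.2).mpr ⟨p, hcn, ?_⟩⟩
          rw [pvChain_one, show (0 : ℤ) + (n : ℤ) = (n : ℤ) from by ring]
          exact hstep
      · rintro ⟨ht1, hc⟩
        obtain ⟨r, hr, hs⟩ := (pvChain_split tmap n 1 0 th t.2).mp hc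
        rw [pvChain_one, show (0 : ℤ) + (n : ℤ) = (n : ℤ) from by ring] at hs
        exact Or.inr ⟨by push_cast at ht1; exact ht1, r,
          (hmem ((n : Int), r)).mpr ⟨rfl, hr⟩, hs⟩

-- ---- B side ----

theorem pvB_visit_eq (tmap : List (List Int)) (h : Int) (pos : Int × Int)
    (rec : Int × Int → PySem.Set (Int × Int)) :
    pvB_visit tmap h pos rec =
      pvA_dirs.foldl (fun s d =>
        if pvOkB tmap (h + 1) (pos.1 + d.1, pos.2 + d.2) then
          PySem.Set.union s (rec (pos.1 + d.1, pos.2 + d.2))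
        else s) PySem.Set.empty := rfl

theorem mem_foldl_union {α β : Type} [BEq β] [LawfulBEq β] (c : α → Bool)
    (g : α → PySem.Set β) (l : List α) (s0 : PySem.Set β) (q : β) :
    q ∈ l.foldl (fun s d => if c d then PySem.Set.union s (g d) else s) s0 ↔
      q ∈ s0 ∨ ∃ d ∈ l, c d = true ∧ q ∈ g d := by
  induction l generalizing s0 with
  | nil => simp
  | cons d l ih =>
    simp only [List.foldl_cons, ih]
    split_ifs with hc
    · rw [PySem.Set.mem_union]
      constructor
      · rintro ((h1 | h1) | ⟨d', hd', hc', hq⟩)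
        · exact Or.inl h1
        · exact Or.inr ⟨d, List.mem_cons_self .., hc, h1⟩
        · exact Or.inr ⟨d', List.mem_cons_of_mem _ hd', hc', hq⟩
      · rintro (h1 | ⟨d', hd', hc', hq⟩)
        · exact Or.inl (Or.inl h1)
        · rcases List.mem_cons.mp hd' with h2 | h2
          · subst h2; exact Or.inl (Or.inr hq)
          · exact Or.inr ⟨d', h2, hc', hq⟩
    · constructor
      · rintro (h1 | ⟨d', hd', hc', hq⟩)
        · exact Or.inl h1
        · exact Or.inr ⟨d', List.mem_cons_of_mem _ hd', hc', hq⟩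
      · rintro (h1 | ⟨d', hd', hc', hq⟩)
        · exact Or.inl h1
        · rcases List.mem_cons.mp hd' with h2 | h2
          · subst h2; exact absurd hc' (by simp [hc])
          · exact Or.inr ⟨d', h2, hc', hq⟩

theorem nodup_foldl_union {α β : Type} [BEq β] [LawfulBEq β] (c : α → Bool)
    (g : α → PySem.Set β) (l : List α) (s0 : PySem.Set β) (hnd : s0.Nodup) :
    (l.foldl (fun s d => if c d then PySem.Set.union s (g d) else s) s0).Nodup := by
  induction l generalizing s0 with
  | nil => exact hnd
  | cons d l ih =>
    simp only [List.foldl_cons]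
    split_ifs
    · exact ih _ (PySem.Set.nodup_union _ _ hnd)
    · exact ih _ hnd

theorem pvB_reach_char (tmap : List (List Int)) :
    ∀ (n : Nat), ∀ (fuel : Nat), n ≤ fuel → ∀ (h : Int), h = 9 - (n : Int) →
    ∀ (p : Int × Int),
    (pvB_reach tmap fuel h p).Nodup ∧
      ∀ q, q ∈ pvB_reach tmap fuel h p ↔ pvChain tmap n h p q := by
  intro n
  induction n with
  | zero =>
    intro fuel _ h hh p
    have h9 : h = 9 := by omega
    subst h9
    rcases fuel with _ | f <;>
    · simp only [pvB_reach]
      rw [if_pos (by simp)]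
      refine ⟨PySem.Set.nodup_ofList _, fun q => ?_⟩
      rw [PySem.Set.mem_ofList]
      simp [pvChain]
  | succ m ih =>
    intro fuel hf h hh p
    have hne : h ≠ 9 := by omega
    rcases fuel with _ | f
    · omega
    · simp only [pvB_reach]
      rw [if_neg (by simpa using hne), pvB_visit_eq]
      have ihm := ih f (by omega) (h + 1) (by omega)
      refine ⟨nodup_foldl_union _ _ _ _ List.nodup_nil, fun q => ?_⟩
      rw [mem_foldl_union]
      simp only [pvChain]
      constructor
      · rintro (hfalse | ⟨d, hd, hok, hq⟩)
        · simp at hfalse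
        · exact ⟨(p.1 + d.1, p.2 + d.2), ⟨d, hd, rfl, hok⟩,
            ((ihm (p.1 + d.1, p.2 + d.2)).2 q).mp hq⟩
      · rintro ⟨r, ⟨d, hd, hr, hok⟩, hc⟩
        subst hr
        exact Or.inr ⟨d, hd, hok, ((ihm (p.1 + d.1, p.2 + d.2)).2 q).mpr hc⟩

-- ===== VERDICT (by name: the statement is the Claim_ definition above) =====
theorem count_hiking_trails_spec : Claim_equal_count_hiking_trails := by
  intro tmap th _hdom _hpre
  unfold Spec_count_hiking_trails count_hiking_trails count_hiking_trails_alt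
  obtain ⟨hndA, hmemA⟩ := pvA_loop_char tmap th 10 0 (PySem.Set.ofList [((0 : Int), th)])
    (by omega) (by omega) (PySem.Set.nodup_ofList _)
    (fun t => by
      rw [PySem.Set.mem_ofList]
      constructor
      · intro ht
        have h1 := List.mem_singleton.mp ht
        subst h1
        exact ⟨by simp, rfl⟩
      · rintro ⟨h1, h2⟩
        have h2' : t.2 = th := h2
        exact List.mem_singleton.mpr (Prod.ext_iff.mpr ⟨by simpa using h1, h2'⟩))
  obtain ⟨hndB, hmemB⟩ := pvB_reach_char tmap 9 10 (by omega) 0 (by simp) th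
  have hinj : Function.Injective (fun q : Int × Int => ((9 : Int), q)) := by
    intro a b hab; simpa using hab
  have hndM : ((pvB_reach tmap 10 0 th).map (fun q => ((9 : Int), q))).Nodup :=
    hndB.map hinj
  have hmm : ∀ t, t ∈ pvA_loop tmap 10 (PySem.Set.ofList [((0 : Int), th)]) ↔
      t ∈ (pvB_reach tmap 10 0 th).map (fun q => ((9 : Int), q)) := by
    intro t
    rw [hmemA t, List.mem_map]
    constructor
    · rintro ⟨h1, h2⟩
      exact ⟨t.2, (hmemB t.2).mpr h2, Prod.ext_iff.mpr ⟨h1.symm, rfl⟩⟩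
    · rintro ⟨q, hq, hqt⟩
      rw [← hqt]
      exact ⟨rfl, (hmemB q).mp hq⟩
  have hperm := (List.perm_ext_iff_of_nodup hndA hndM).mpr hmm
  have hlen : (pvA_loop tmap 10 (PySem.Set.ofList [((0 : Int), th)])).length
      = (pvB_reach tmap 10 0 th).length := by
    rw [hperm.length_eq, List.length_map]
  simp [PySem.Set.len, hlen]
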